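-- pv_equiv track=rewrite | github.com/AllenEdgarPoe/ComfyUI-Xorbis-nodes | utils.py | replace_prompts_in_template_advanced
-- ===== SOURCE A (Python) =====
-- def split_template_advanced(template: str) -> tuple:
--     """
--     Splits a template into two parts based on a specific pattern.
--     """
--     if " . " in template:
--         template_prompt_g, template_prompt_l = template.split(" . ", 1)
--         template_prompt_g = template_prompt_g.strip()
--         template_prompt_l = template_prompt_l.strip()
--     else:
--         template_prompt_g = template
--         template_prompt_l = ""
--
--     return template_prompt_g, template_prompt_l
--
-- def replace_prompts_in_template_advanced(template, positive_prompt_g, positive_prompt_l, negative_prompt,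
--                                          negative_prompt_to, copy_to_l):
--     """
--     Replace the placeholders in a given template with the provided prompts and split them accordingly.
--
--     Args:
--     - template (dict): The template containing prompt placeholders.
--     - positive_prompt_g (str): The main positive prompt to replace '{prompt}' in the template.
--     - positive_prompt_l (str): The auxiliary positive prompt to be combined in a specific manner.
--     - negative_prompt (str): The negative prompt to be combined with any existing negative prompt in the template.
--     - negative_prompt_to (str): The negative prompt destination {Both, G only, L only}.
--     - copy_to_l (bool): Copy the G positive prompt to L.
--
--     Returns:
--     - tuple: A tuple containing the replaced main positive, auxiliary positive, combined positive,  main negative, auxiliary negative, and negative prompts.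
--     """
--     template_prompt_g, template_prompt_l_template = split_template_advanced(template['prompt'])
--
--     text_g_positive = template_prompt_g.replace("{prompt}", positive_prompt_g)
--
--     text_l_positive = f"{template_prompt_l_template.replace('{prompt}', positive_prompt_g)}, {positive_prompt_l}" if template_prompt_l_template and positive_prompt_l else template_prompt_l_template.replace(
--         '{prompt}', positive_prompt_g) or positive_prompt_l
--
--     if copy_to_l and positive_prompt_g and "{prompt}" not in template_prompt_l_template:
--         token_positive_g = list(map(lambda x: x.strip(), text_g_positive.split(",")))
--         token_positive_l = list(map(lambda x: x.strip(), text_l_positive.split(",")))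
--
--         # deduplicate common prompt parts
--         for token_g in token_positive_g:
--             if token_g in token_positive_l:
--                 token_positive_l.remove(token_g)
--
--         token_positive_g.extend(token_positive_l)
--
--         text_l_positive = ", ".join(token_positive_g)
--
--     text_positive = f"{text_g_positive} . {text_l_positive}" if text_l_positive else text_g_positive
--
--     json_negative_prompt = template.get('negative_prompt', "")
--     text_negative = f"{json_negative_prompt}, {negative_prompt}" if json_negative_prompt and negative_prompt else json_negative_prompt or negative_prompt
--
--     text_g_negative = ""
--     if negative_prompt_to in ("Both", "G only"):
--         text_g_negative = text_negative
--
--     text_l_negative = ""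
--     if negative_prompt_to in ("Both", "L only"):
--         text_l_negative = text_negative
--
--     return text_g_positive, text_l_positive, text_positive, text_g_negative, text_l_negative, text_negative
-- ===== SOURCE B (Python) =====
-- def _split_tpl(template):
--     # partition-style split: find the first " . " and slice, instead of str.split
--     i = template.find(" . ")
--     if i < 0:
--         return template, ""
--     return template[:i].strip(), template[i + 3:].strip()
--
--
-- def _comma(a, b):
--     return f"{a}, {b}" if a and b else (a or b)
--
--
-- def _positives(gt, lt, g, l, copy):
--     gp = gt.replace("{prompt}", g)
--     rl = lt.replace("{prompt}", g)
--     lp = f"{rl}, {l}" if lt and l else (rl or l)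
--     if copy and g and "{prompt}" not in lt:
--         tg = [x.strip() for x in gp.split(",")]
--         tl = [x.strip() for x in lp.split(",")]
--         # multiset-count dedup: one budget table over G, one forward pass over L
--         need = {}
--         for t in tg:
--             need[t] = need.get(t, 0) + 1
--         kept = []
--         for t in tl:
--             c = need.get(t, 0)
--             if c > 0:
--                 need[t] = c - 1
--             else:
--                 kept.append(t)
--         lp = ", ".join(tg + kept)
--     return gp, lp, (f"{gp} . {lp}" if lp else gp)
--
--
-- def _negatives(base, neg, to):
--     tn = _comma(base, neg)
--     route = {"Both": (tn, tn), "G only": (tn, ""), "L only": ("", tn)}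
--     gn, ln = route.get(to, ("", ""))
--     return gn, ln, tn
--
--
-- def replace_prompts_in_template_advanced(template, positive_prompt_g, positive_prompt_l, negative_prompt,
--                                          negative_prompt_to, copy_to_l):
--     gt, lt = _split_tpl(template['prompt'])
--     gp, lp, p = _positives(gt, lt, positive_prompt_g, positive_prompt_l, copy_to_l)
--     gn, ln, n = _negatives(template.get('negative_prompt', ""), negative_prompt, negative_prompt_to)
--     return gp, lp, p, gn, ln, n
-- ===== Notes on version B (the rewrite author's own statement) =====
-- stated objective: faster
-- what changed: B is decomposed into staged helpers (find+slice partition-style template split instead of str.split, a positives stage whose O(n*m) scan-and-remove dedup becomes a count-budget table plus one forward pass over L, and a negatives stage routed by a lookup table instead of two membership tests).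
-- outside the precondition, e.g. on replace_prompts_in_template_advanced({}, 'a', 'b', 'c', 'Both', True): A raises KeyError, B raises KeyError
import Mathlib
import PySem

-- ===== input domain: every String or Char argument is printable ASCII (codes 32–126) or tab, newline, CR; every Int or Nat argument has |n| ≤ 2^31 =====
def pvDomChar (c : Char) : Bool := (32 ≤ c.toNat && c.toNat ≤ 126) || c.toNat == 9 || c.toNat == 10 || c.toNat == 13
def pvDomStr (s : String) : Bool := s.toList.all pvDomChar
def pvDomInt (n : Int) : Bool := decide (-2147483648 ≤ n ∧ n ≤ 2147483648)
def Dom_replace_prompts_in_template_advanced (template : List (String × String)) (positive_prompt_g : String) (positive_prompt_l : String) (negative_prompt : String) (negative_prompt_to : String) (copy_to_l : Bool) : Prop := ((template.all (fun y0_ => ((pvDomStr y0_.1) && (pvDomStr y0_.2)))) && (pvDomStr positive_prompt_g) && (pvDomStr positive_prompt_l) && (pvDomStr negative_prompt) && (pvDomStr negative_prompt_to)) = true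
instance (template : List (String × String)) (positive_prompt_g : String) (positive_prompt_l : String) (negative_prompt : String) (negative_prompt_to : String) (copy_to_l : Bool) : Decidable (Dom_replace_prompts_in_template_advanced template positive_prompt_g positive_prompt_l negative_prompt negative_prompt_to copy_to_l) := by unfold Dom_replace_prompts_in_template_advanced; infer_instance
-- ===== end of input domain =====

-- B restructures A into staged helpers: a find+slice partition-style template split, a count-table
-- one-pass dedup replacing A's scan-and-remove, and table-lookup negative routing; equivalence is
-- proved on all inputs whose template dict has a 'prompt' key.
-- ===== PORT A =====
-- split(" . ", 1) is guarded by '" . " in template', so it always yields exactly 2 parts;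
-- the Python 2-tuple unpack is therefore ported as indexing the 2-element result.
def split_template_advanced (template : String) : String × String :=
  if PySem.Str.isIn " . " template then
    let parts := (PySem.Str.splitMax? template " . " 1).getD []
    (PySem.Str.strip (PySem.List.pyGetD parts 0 ""), PySem.Str.strip (PySem.List.pyGetD parts 1 ""))
  else (template, "")

-- A's dedup loop: for token_g in G: if token_g in L: L.remove(token_g)
def pvDedupA (token_g token_l : List String) : List String :=
  token_g.foldl (fun l g => if g ∈ l then (PySem.List.remove? l g).getD l else l) token_l

-- template['prompt'] raises KeyError when the key is absent; excluded by Pre_ below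
def replace_prompts_in_template_advanced (template : List (String × String)) (positive_prompt_g : String) (positive_prompt_l : String) (negative_prompt : String) (negative_prompt_to : String) (copy_to_l : Bool) : String × String × String × String × String × String :=
  let p := split_template_advanced ((PySem.Dict.mk template).getD "prompt" "")
  let template_prompt_g := p.1
  let template_prompt_l_template := p.2
  let text_g_positive := PySem.Str.replace template_prompt_g "{prompt}" positive_prompt_g
  let repl_l := PySem.Str.replace template_prompt_l_template "{prompt}" positive_prompt_g
  let text_l_positive :=
    if template_prompt_l_template ≠ "" ∧ positive_prompt_l ≠ "" then repl_l ++ ", " ++ positive_prompt_l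
    else if repl_l ≠ "" then repl_l else positive_prompt_l
  let text_l_positive :=
    if copy_to_l = true ∧ positive_prompt_g ≠ "" ∧ PySem.Str.isIn "{prompt}" template_prompt_l_template = false then
      let token_positive_g := ((PySem.Str.split? text_g_positive ",").getD []).map PySem.Str.strip
      let token_positive_l := ((PySem.Str.split? text_l_positive ",").getD []).map PySem.Str.strip
      PySem.Str.join ", " (token_positive_g ++ pvDedupA token_positive_g token_positive_l)
    else text_l_positive
  let text_positive := if text_l_positive ≠ "" then text_g_positive ++ " . " ++ text_l_positive else text_g_positive
  let json_negative_prompt := (PySem.Dict.mk template).getD "negative_prompt" ""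
  let text_negative :=
    if json_negative_prompt ≠ "" ∧ negative_prompt ≠ "" then json_negative_prompt ++ ", " ++ negative_prompt
    else if json_negative_prompt ≠ "" then json_negative_prompt else negative_prompt
  let text_g_negative := if negative_prompt_to = "Both" ∨ negative_prompt_to = "G only" then text_negative else ""
  let text_l_negative := if negative_prompt_to = "Both" ∨ negative_prompt_to = "L only" then text_negative else ""
  (text_g_positive, text_l_positive, text_positive, text_g_negative, text_l_negative, text_negative)

-- ===== PORT B =====
-- _split_tpl from Source B: partition-style split via find + slices
def pvSplitTpl (t : String) : String × String :=
  let i := PySem.Str.find t " . "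
  if i < 0 then (t, "")
  else (PySem.Str.strip (PySem.Str.slice t none (some i)),
        PySem.Str.strip (PySem.Str.slice t (some (i + 3)) none))

-- _comma(a, b) from Source B
def pvComma (a b : String) : String :=
  if a ≠ "" ∧ b ≠ "" then a ++ ", " ++ b else if a ≠ "" then a else b

-- need = {}; for t in tg: need[t] = need.get(t, 0) + 1
def pvNeed (tg : List String) : PySem.Dict String Int :=
  tg.foldl (fun d t => d.insert t (d.getD t 0 + 1)) PySem.Dict.empty

-- kept = []; for t in tl: c = need.get(t, 0); if c > 0: need[t] = c - 1 else: kept.append(t)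
def pvKept (need : PySem.Dict String Int) : List String → List String
  | [] => []
  | t :: r =>
    let c := need.getD t 0
    if c > 0 then pvKept (need.insert t (c - 1)) r else t :: pvKept need r

-- _positives from Source B
def pvPositives (gt lt g l : String) (copy : Bool) : String × String × String :=
  let gp := PySem.Str.replace gt "{prompt}" g
  let rl := PySem.Str.replace lt "{prompt}" g
  let lp := if lt ≠ "" ∧ l ≠ "" then rl ++ ", " ++ l else if rl ≠ "" then rl else l
  let lp :=
    if copy = true ∧ g ≠ "" ∧ PySem.Str.isIn "{prompt}" lt = false then
      let tg := ((PySem.Str.split? gp ",").getD []).map PySem.Str.strip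
      let tl := ((PySem.Str.split? lp ",").getD []).map PySem.Str.strip
      PySem.Str.join ", " (tg ++ pvKept (pvNeed tg) tl)
    else lp
  (gp, lp, if lp ≠ "" then gp ++ " . " ++ lp else gp)

-- _negatives from Source B
def pvNegatives (base neg dest : String) : String × String × String :=
  let tn := pvComma base neg
  let gl := (PySem.Dict.mk [("Both", (tn, tn)), ("G only", (tn, "")), ("L only", ("", tn))]).getD dest ("", "")
  (gl.1, gl.2, tn)

def replace_prompts_in_template_advanced_alt (template : List (String × String)) (positive_prompt_g : String) (positive_prompt_l : String) (negative_prompt : String) (negative_prompt_to : String) (copy_to_l : Bool) : String × String × String × String × String × String :=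
  let s := pvSplitTpl ((PySem.Dict.mk template).getD "prompt" "")
  let q := pvPositives s.1 s.2 positive_prompt_g positive_prompt_l copy_to_l
  let r := pvNegatives ((PySem.Dict.mk template).getD "negative_prompt" "") negative_prompt negative_prompt_to
  (q.1, q.2.1, q.2.2, r.1, r.2.1, r.2.2)

-- ===== PRECONDITION & SPEC =====
-- Pre_ excludes exactly the dicts without a 'prompt' key, on which A (and B) raise KeyError.
def Pre_replace_prompts_in_template_advanced (template : List (String × String)) (positive_prompt_g : String) (positive_prompt_l : String) (negative_prompt : String) (negative_prompt_to : String) (copy_to_l : Bool) : Prop :=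
  "prompt" ∈ template.map Prod.fst
instance (template : List (String × String)) (positive_prompt_g : String) (positive_prompt_l : String) (negative_prompt : String) (negative_prompt_to : String) (copy_to_l : Bool) : Decidable (Pre_replace_prompts_in_template_advanced template positive_prompt_g positive_prompt_l negative_prompt negative_prompt_to copy_to_l) := by unfold Pre_replace_prompts_in_template_advanced; infer_instance

def pvWitness_replace_prompts_in_template_advanced : (List (String × String)) × String × String × String × String × Bool :=
  ([("prompt", "best quality, {prompt} . cat"), ("negative_prompt", "blurry")], "cat, dog", "dog", "ugly", "Both", true)

def Spec_replace_prompts_in_template_advanced (template : List (String × String)) (positive_prompt_g : String) (positive_prompt_l : String) (negative_prompt : String) (negative_prompt_to : String) (copy_to_l : Bool) (out : String × String × String × String × String × String) : Prop := out = replace_prompts_in_template_advanced_alt template positive_prompt_g positive_prompt_l negative_prompt negative_prompt_to copy_to_l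
instance (template : List (String × String)) (positive_prompt_g : String) (positive_prompt_l : String) (negative_prompt : String) (negative_prompt_to : String) (copy_to_l : Bool) (out : String × String × String × String × String × String) : Decidable (Spec_replace_prompts_in_template_advanced template positive_prompt_g positive_prompt_l negative_prompt negative_prompt_to copy_to_l out) := by unfold Spec_replace_prompts_in_template_advanced; infer_instance

-- ===== CLAIM (what is proved, stated in full; the proofs are below) =====
def Claim_equal_replace_prompts_in_template_advanced : Prop := ∀ (template : List (String × String)) (positive_prompt_g : String) (positive_prompt_l : String) (negative_prompt : String) (negative_prompt_to : String) (copy_to_l : Bool), Dom_replace_prompts_in_template_advanced template positive_prompt_g positive_prompt_l negative_prompt negative_prompt_to copy_to_l → Pre_replace_prompts_in_template_advanced template positive_prompt_g positive_prompt_l negative_prompt negative_prompt_to copy_to_l → Spec_replace_prompts_in_template_advanced template positive_prompt_g positive_prompt_l negative_prompt negative_prompt_to copy_to_l (replace_prompts_in_template_advanced template positive_prompt_g positive_prompt_l negative_prompt negative_prompt_to copy_to_l)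

-- ===== LEMMAS AND PROOFS =====

theorem pvWitness_ok : Dom_replace_prompts_in_template_advanced (pvWitness_replace_prompts_in_template_advanced.1) (pvWitness_replace_prompts_in_template_advanced.2.1) (pvWitness_replace_prompts_in_template_advanced.2.2.1) (pvWitness_replace_prompts_in_template_advanced.2.2.2.1) (pvWitness_replace_prompts_in_template_advanced.2.2.2.2.1) (pvWitness_replace_prompts_in_template_advanced.2.2.2.2.2) ∧ Pre_replace_prompts_in_template_advanced (pvWitness_replace_prompts_in_template_advanced.1) (pvWitness_replace_prompts_in_template_advanced.2.1) (pvWitness_replace_prompts_in_template_advanced.2.2.1) (pvWitness_replace_prompts_in_template_advanced.2.2.2.1) (pvWitness_replace_prompts_in_template_advanced.2.2.2.2.1) (pvWitness_replace_prompts_in_template_advanced.2.2.2.2.2) := by decide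

-- B's find+slice partition split equals A's split(" . ", 1)

theorem findgo_shift (sep : List Char) : ∀ (l : List Char) (k : Nat),
    PySem.Chars.find.go sep l k = if PySem.Chars.find.go sep l 0 < 0 then -1 else PySem.Chars.find.go sep l 0 + k := by
  intro l
  induction l with
  | nil => intro k; simp [PySem.Chars.find.go]; split <;> simp_all
  | cons c rest ih =>
    intro k
    by_cases hp : sep.isPrefixOf (c :: rest) = true
    · simp [PySem.Chars.find.go, hp]
    · simp only [PySem.Chars.find.go, hp, if_false, Bool.false_eq_true]
      rw [ih (k+1), ih 1]
      split <;> split <;> omega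

theorem go_m0 (sep : List Char) (fuel : Nat) (l cur : List Char) (acc : List (List Char)) :
    PySem.Chars.splitOnMax.go sep fuel 0 l cur acc = acc.reverse ++ [cur.reverse ++ l] := by
  cases fuel with
  | zero => simp [PySem.Chars.splitOnMax.go]
  | succ f => cases l with
    | nil => simp [PySem.Chars.splitOnMax.go]
    | cons c r => simp [PySem.Chars.splitOnMax.go]

theorem go_m1 (sep : List Char) (hsep : sep ≠ []) : ∀ (fuel : Nat) (l cur : List Char) (acc : List (List Char)),
    l.length ≤ fuel →
    PySem.Chars.splitOnMax.go sep fuel 1 l cur acc =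
      if PySem.Chars.find l sep < 0 then acc.reverse ++ [cur.reverse ++ l]
      else acc.reverse ++ [cur.reverse ++ l.take (PySem.Chars.find l sep).toNat,
                           l.drop ((PySem.Chars.find l sep).toNat + sep.length)] := by
  intro fuel
  induction fuel with
  | zero =>
    intro l cur acc hl
    have : l = [] := by cases l <;> simp_all
    subst this
    simp [PySem.Chars.splitOnMax.go, PySem.Chars.find, PySem.Chars.find.go, hsep, List.isEmpty_iff]
  | succ f ih =>
    intro l cur acc hl
    cases l with
    | nil =>
      simp [PySem.Chars.splitOnMax.go, PySem.Chars.find, PySem.Chars.find.go, hsep, List.isEmpty_iff]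
    | cons c r =>
      by_cases hp : sep.isPrefixOf (c :: r) = true
      · have hfind : PySem.Chars.find (c :: r) sep = 0 := by
          simp [PySem.Chars.find, PySem.Chars.find.go, hp]
        simp only [PySem.Chars.splitOnMax.go, hp, if_true, hfind]
        norm_num
        rw [go_m0]
        simp
      · have hstep : PySem.Chars.find (c :: r) sep =
            if PySem.Chars.find r sep < 0 then -1 else PySem.Chars.find r sep + 1 := by
          simp only [PySem.Chars.find, PySem.Chars.find.go, hp, if_false, Bool.false_eq_true]
          rw [findgo_shift]
          norm_num
        simp only [PySem.Chars.splitOnMax.go, hp, if_false, Bool.false_eq_true]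
        norm_num
        rw [ih r (c :: cur) acc (by simpa using Nat.le_of_succ_le_succ (by simpa using hl))]
        rw [hstep]
        by_cases hneg : PySem.Chars.find r sep < 0
        · simp [hneg]
        · have h0 : 0 ≤ PySem.Chars.find r sep := by omega
          rw [if_neg hneg, if_neg (by omega)]
          have ht : (PySem.Chars.find r sep + 1).toNat = (PySem.Chars.find r sep).toNat + 1 := by omega
          simp only [if_neg hneg, ht]
          simp [List.take_succ_cons, List.drop_succ_cons, Nat.add_right_comm]

theorem splitOnMax_one (sep : List Char) (hsep : sep ≠ []) (s : List Char) :
    PySem.Chars.splitOnMax s sep 1 =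
      if PySem.Chars.find s sep < 0 then [s]
      else [s.take (PySem.Chars.find s sep).toNat, s.drop ((PySem.Chars.find s sep).toNat + sep.length)] := by
  unfold PySem.Chars.splitOnMax
  rw [if_neg (by norm_num)]
  simp only [Int.toNat_one]
  rw [go_m1 sep hsep (s.length + 1) s [] [] (by omega)]
  split <;> simp

set_option maxHeartbeats 1000000 in
theorem pvSplitTpl_eq (t : String) : pvSplitTpl t = split_template_advanced t := by
  unfold pvSplitTpl split_template_advanced
  by_cases hin : PySem.Str.isIn " . " t = true
  · have hnn : 0 ≤ PySem.Str.find t " . " := (PySem.Str.find_nonneg_iff t " . ").mpr (by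
      simpa using ((PySem.Str.isIn_iff_infix " . " t).mp hin))
    rw [if_pos hin, if_neg (by omega)]
    have hsep : (" . " : String).toList ≠ [] := by decide
    have hsm : PySem.Str.splitMax? t " . " 1 =
        some ((PySem.Chars.splitOnMax t.toList " . ".toList 1).map String.ofList) := by
      unfold PySem.Str.splitMax? PySem.Chars.splitMax?
      rw [if_neg (by decide)]
      rfl
    rw [hsm, splitOnMax_one _ hsep]
    have hfind : PySem.Chars.find t.toList " . ".toList = PySem.Str.find t " . " := by simp
    rw [hfind, if_neg (by omega)]
    simp only [Option.getD_some, List.map_cons, List.map_nil]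
    rw [Prod.mk.injEq]
    constructor
    · congr 1
      apply String.toList_injective
      rw [PySem.Str.toList_slice]
      simp only [PySem.Chars.slice_eq_listSlice, PySem.List.slice_to _ hnn]
      simp [PySem.List.pyGetD]
    · congr 1
      apply String.toList_injective
      have h3 : (0:Int) ≤ PySem.Str.find t " . " + 3 := by omega
      rw [PySem.Str.toList_slice]
      simp only [PySem.Chars.slice_eq_listSlice, PySem.List.slice_from _ h3]
      simp [PySem.List.pyGetD]
      have hnn' : 0 ≤ PySem.Chars.find t.toList [' ', '.', ' '] := by
        simpa using hnn
      congr 1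
      omega
  · have : PySem.Str.find t " . " = -1 := (PySem.Str.find_eq_neg_one_iff t " . ").mpr (by
      intro h; exact hin ((PySem.Str.isIn_iff_infix " . " t).mpr h))
    rw [if_neg hin, if_pos (by rw [this]; norm_num)]

-- A's remove-loop is list difference
theorem pvDedupA_eq_diff (G L : List String) : pvDedupA G L = L.diff G := by
  unfold pvDedupA
  rw [List.diff_eq_foldl]
  have h : (fun (l : List String) (g : String) => if g ∈ l then (PySem.List.remove? l g).getD l else l)
      = fun (l : List String) (g : String) => l.erase g := by
    funext l g
    by_cases hm : g ∈ l
    · simp [hm, PySem.List.remove?_eq_some_erase l g hm]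
    · simp [hm, List.erase_of_not_mem hm]
  rw [h]

-- B's counted one-pass is list difference, for any budget table agreeing with G's counts
theorem pvKept_eq_diff (L : List String) : ∀ (G : List String) (d : PySem.Dict String Int),
    (∀ t, d.getD t 0 = (G.count t : Int)) → pvKept d L = L.diff G := by
  induction L with
  | nil => intro G d _; simp [pvKept]
  | cons t r ih =>
    intro G d hd
    rw [List.cons_diff]
    by_cases hm : t ∈ G
    · have hc : (0 : Int) < d.getD t 0 := by
        rw [hd t]; exact_mod_cast List.count_pos_iff.mpr hm
      simp only [pvKept, if_pos hc, if_pos hm]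
      apply ih
      intro s
      rw [PySem.Dict.getD_insert]
      by_cases hs : s = t
      · subst hs
        rw [if_pos rfl, hd s, List.count_erase_self]
        have : 0 < G.count s := List.count_pos_iff.mpr hm
        push_cast [Nat.cast_sub (by omega : 1 ≤ G.count s)]
        ring
      · rw [if_neg hs, hd s, List.count_erase_of_ne hs]
    · have hc : ¬ (0 : Int) < d.getD t 0 := by
        rw [hd t]
        simp [List.count_eq_zero_of_not_mem hm]
      simp only [pvKept, if_neg hc, if_neg hm]
      rw [ih G d hd]

theorem pvDedup_eq (G L : List String) : pvDedupA G L = pvKept (pvNeed G) L := by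
  rw [pvDedupA_eq_diff, pvKept_eq_diff L G (pvNeed G)]
  intro t
  unfold pvNeed
  rw [PySem.Dict.getD_foldl_insert_add_one, PySem.Dict.getD_empty]
  ring

-- B's routing table equals A's two membership tests
theorem route_eq (npt tn : String) :
    (PySem.Dict.mk [("Both", (tn, tn)), ("G only", (tn, "")), ("L only", ("", tn))]).getD npt ("", "")
      = (if npt = "Both" ∨ npt = "G only" then tn else "", if npt = "Both" ∨ npt = "L only" then tn else "") := by
  by_cases h1 : npt = "Both"
  · subst h1; rfl
  · by_cases h2 : npt = "G only"
    · subst h2; rfl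
    · by_cases h3 : npt = "L only"
      · subst h3; rfl
      · rw [PySem.Dict.getD_eq_get?_getD]
        simp [PySem.Dict.get?, beq_iff_eq,
          Ne.symm h1, Ne.symm h2, Ne.symm h3, h1, h2, h3]

-- ===== VERDICT (by name: the statement is the Claim_ definition above) =====
theorem replace_prompts_in_template_advanced_spec : Claim_equal_replace_prompts_in_template_advanced := by
  intro template positive_prompt_g positive_prompt_l negative_prompt negative_prompt_to copy_to_l _ _
  unfold Spec_replace_prompts_in_template_advanced
  unfold replace_prompts_in_template_advanced replace_prompts_in_template_advanced_alt
  unfold pvPositives pvNegatives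
  simp only [pvSplitTpl_eq, pvComma, pvDedup_eq, route_eq]
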